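-- pv_equiv track=rewrite | github.com/jano31415/codejam | codeforces/723_round_div2/probd.py | left_right_count
-- ===== SOURCE A (Python) =====
-- def left_right_count(dna2, a, grpa_assigned, grpb_assigned):
--     tot = 0
--     for i, d in enumerate(dna2):
--         if d == a:
--             tot += abs(i - grpa_assigned)
--             grpa_assigned += 1
--         else:
--             tot += abs(i - grpb_assigned)
--             grpb_assigned += 1
--     return tot//2
-- ===== SOURCE B (Python) =====
-- def left_right_count(dna2, a, grpa_assigned, grpb_assigned):
--     # Displacement formulation: the k-th matching element at index i costs
--     # |i - (grpa_assigned + k)| = |pref[i] - grpa_assigned| where pref[i] is the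
--     # number of NON-matching elements before i (since i - k = pref[i]); likewise
--     # a non-matching element costs |(i - pref[i]) - grpb_assigned|.
--     flags = [d == a for d in dna2]
--     # prefix counts of non-matching elements (pref[i] = # of False among flags[:i])
--     pref = [0]
--     for f in flags:
--         pref.append(pref[-1] + (0 if f else 1))
--     tot = sum(abs(p - grpa_assigned) if f else abs((i - p) - grpb_assigned)
--               for i, (f, p) in enumerate(zip(flags, pref)))
--     return tot // 2
-- ===== Notes on version B (the rewrite author's own statement) =====
-- stated objective: alternative
-- what changed: Instead of simulating A's three mutable counters, B uses the displacement identity |i-(start+k)| = |(#opposite-class elements before i) - start|: it builds a boolean mask and a prefix-count array of non-matching elements, then sums per-element costs from that array; the running assignment counters disappear.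
import Mathlib
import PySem

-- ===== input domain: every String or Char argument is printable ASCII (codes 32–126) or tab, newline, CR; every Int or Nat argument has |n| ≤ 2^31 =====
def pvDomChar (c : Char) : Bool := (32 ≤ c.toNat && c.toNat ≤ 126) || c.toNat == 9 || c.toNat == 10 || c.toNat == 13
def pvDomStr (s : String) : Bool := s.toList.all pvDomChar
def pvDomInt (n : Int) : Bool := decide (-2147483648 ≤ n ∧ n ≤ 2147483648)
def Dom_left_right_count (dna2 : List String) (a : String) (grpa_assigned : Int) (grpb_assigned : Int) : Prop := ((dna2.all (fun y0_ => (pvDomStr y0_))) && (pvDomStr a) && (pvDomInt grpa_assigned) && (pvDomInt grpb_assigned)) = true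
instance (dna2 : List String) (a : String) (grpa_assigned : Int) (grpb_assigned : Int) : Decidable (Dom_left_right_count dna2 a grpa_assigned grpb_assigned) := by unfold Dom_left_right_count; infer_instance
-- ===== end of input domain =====

-- B drops A's running assignment counters via the displacement identity
-- |i-(start+k)| = |#opposite-class-before-i - start|, using a mask and a
-- prefix-count array instead (objective: alternative algorithm, same cost).

-- ===== PORT A =====
-- the for-loop over enumerate(dna2) with state (grpa_assigned, grpb_assigned, tot)
def lrcLoop (a : String) : List (Int × String) → Int → Int → Int → Int
  | [], _, _, tot => tot
  | (i, d) :: rest, ga, gb, tot =>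
    if d == a then lrcLoop a rest (ga + 1) gb (tot + |i - ga|)
    else lrcLoop a rest ga (gb + 1) (tot + |i - gb|)

def left_right_count (dna2 : List String) (a : String) (grpa_assigned : Int) (grpb_assigned : Int) : Int :=
  PySem.Int.floordiv (lrcLoop a (PySem.List.enumerate dna2) grpa_assigned grpb_assigned 0) 2

-- ===== PORT B =====
-- pref = [0]; for f in flags: pref.append(pref[-1] + (0 if f else 1))
def lrcPref : List Bool → Int → List Int
  | [], c => [c]
  | f :: r, c => c :: lrcPref r (c + if f then 0 else 1)

def left_right_count_alt (dna2 : List String) (a : String) (grpa_assigned : Int) (grpb_assigned : Int) : Int :=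
  let flags := dna2.map (fun d => d == a)
  let pref := lrcPref flags 0
  let tot := ((PySem.List.enumerate (flags.zip pref)).map
      (fun p => if p.2.1 then |p.2.2 - grpa_assigned| else |(p.1 - p.2.2) - grpb_assigned|)).sum
  PySem.Int.floordiv tot 2

-- ===== PRECONDITION & SPEC =====
def Spec_left_right_count (dna2 : List String) (a : String) (grpa_assigned : Int) (grpb_assigned : Int) (out : Int) : Prop := out = left_right_count_alt dna2 a grpa_assigned grpb_assigned
instance (dna2 : List String) (a : String) (grpa_assigned : Int) (grpb_assigned : Int) (out : Int) : Decidable (Spec_left_right_count dna2 a grpa_assigned grpb_assigned out) := by unfold Spec_left_right_count; infer_instance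

-- ===== CLAIM (what is proved, stated in full; the proofs are below) =====
def Claim_equal_left_right_count : Prop := ∀ (dna2 : List String) (a : String) (grpa_assigned : Int) (grpb_assigned : Int), Dom_left_right_count dna2 a grpa_assigned grpb_assigned → Spec_left_right_count dna2 a grpa_assigned grpb_assigned (left_right_count dna2 a grpa_assigned grpb_assigned)

-- ===== LEMMAS AND PROOFS =====

-- A's loop, started with pA elements already assigned to group a and pB to group b
-- (so the current index is pA + pB), equals tot plus B's prefix-count sum.
theorem lrcLoop_eq_sum (a : String) (l : List String) (ga gb : Int) :
    ∀ (pA pB tot : Int),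
    lrcLoop a (PySem.List.enumerate l (pA + pB)) (ga + pA) (gb + pB) tot
      = tot + ((PySem.List.enumerate ((l.map (fun d => d == a)).zip
            (lrcPref (l.map (fun d => d == a)) pB)) (pA + pB)).map
          (fun p => if p.2.1 then |p.2.2 - ga| else |(p.1 - p.2.2) - gb|)).sum := by
  induction l with
  | nil => intro pA pB tot; simp [PySem.List.enumerate, lrcLoop, lrcPref]
  | cons d rest ih =>
    intro pA pB tot
    simp only [List.map_cons, lrcPref, List.zip_cons_cons,
      PySem.List.enumerate_cons, lrcLoop, List.map_cons, List.sum_cons]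
    by_cases h : d == a
    · simp only [h, ↓reduceIte]
      have e1 : pA + pB + 1 = (pA + 1) + pB := by ring
      have e2 : ga + pA + 1 = ga + (pA + 1) := by ring
      rw [e1, e2, ih (pA + 1) pB]
      have e3 : (pA + pB : Int) - (ga + pA) = pB - ga := by ring
      rw [e3, add_assoc, add_zero]
    · simp only [h, Bool.false_eq_true, ↓reduceIte]
      have e1 : pA + pB + 1 = pA + (pB + 1) := by ring
      have e2 : gb + pB + 1 = gb + (pB + 1) := by ring
      rw [e1, e2, ih pA (pB + 1)]
      have e3 : (pA + pB : Int) - (gb + pB) = (pA + pB - pB) - gb := by ring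
      rw [e3, add_assoc]

-- ===== VERDICT (by name: the statement is the Claim_ definition above) =====
theorem left_right_count_spec : Claim_equal_left_right_count := by
  intro dna2 a ga gb _
  show left_right_count dna2 a ga gb = left_right_count_alt dna2 a ga gb
  simp only [left_right_count, left_right_count_alt]
  have := lrcLoop_eq_sum a dna2 ga gb 0 0 0
  simp only [add_zero, zero_add] at this
  rw [this]
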